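-- pv_equiv track=rewrite | github.com/Artemis21/polybots | ArenaBot/ArenaBot/bot/cogs/games.py | pretty_mods
-- ===== SOURCE A (Python) =====
-- def pretty_mods(mods):
--     '''
--     Display format a list of modifiers.
--     '''
--     one = '{}{}: {:<20.20}'
--     line = True
--     text = ''
--     n = 1
--     for i in mods:
--         text += one.format(('|', '\n')[line], n, i)
--         line = not line
--         n += 1
--     return '```' + (text[1:] or '[no modifiers found]') + '```'
-- ===== SOURCE B (Python) =====
-- def pretty_mods(mods):
--     '''
--     Display format a list of modifiers.
--     '''
--     lines = []
--     for start in range(0, len(mods), 2):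
--         chunk = mods[start:start + 2]
--         lines.append('|'.join('{}: {:<20.20}'.format(start + j + 1, item)
--                               for j, item in enumerate(chunk)))
--     body = '\n'.join(lines)
--     return '```' + (body or '[no modifiers found]') + '```'
-- ===== Notes on version B (the rewrite author's own statement) =====
-- stated objective: alternative
-- what changed: Replaces the alternating line-flag accumulator and the text[1:] strip by iterating over the modifiers in chunks of two with a global 1-based index, joining each chunk's entries with '|' and the lines with '\n'.
import Mathlib
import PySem

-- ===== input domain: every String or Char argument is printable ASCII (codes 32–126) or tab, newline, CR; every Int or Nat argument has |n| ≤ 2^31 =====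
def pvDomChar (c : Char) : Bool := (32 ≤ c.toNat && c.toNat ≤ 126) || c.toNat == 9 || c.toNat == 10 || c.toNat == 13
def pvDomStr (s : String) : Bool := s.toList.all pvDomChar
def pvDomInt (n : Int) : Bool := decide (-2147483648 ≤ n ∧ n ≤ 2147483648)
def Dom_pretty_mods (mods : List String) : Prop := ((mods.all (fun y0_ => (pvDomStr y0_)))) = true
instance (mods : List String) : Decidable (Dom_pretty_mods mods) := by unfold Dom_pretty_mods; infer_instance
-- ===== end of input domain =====

-- B reorganises A's single alternating-flag pass into chunks of two with a global index;
-- same algorithmic cost, different decomposition (objective: alternative).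

-- shared format helper: Python '{:<20.20}' — truncate to 20 chars, then left-justify to width 20
def pvFmt20 (s : List Char) : List Char :=
  s.take 20 ++ List.replicate (20 - (s.take 20).length) ' '

-- ===== PORT A =====
-- A's loop body: state is (line flag, accumulated text, counter n)
def pvStepA (st : Bool × List Char × Int) (i : String) : Bool × List Char × Int :=
  (!st.1,
   st.2.1 ++ (if st.1 then ['\n'] else ['|'])
       ++ (PySem.Int.toStr st.2.2).toList ++ (": ".toList) ++ pvFmt20 i.toList,
   st.2.2 + 1)

def pretty_mods (mods : List String) : String :=
  let r := mods.foldl pvStepA (true, [], (1 : Int))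
  let t := r.2.1.drop 1            -- text[1:]
  String.ofList ("```".toList ++ (if t = [] then "[no modifiers found]".toList else t) ++ "```".toList)

-- ===== PORT B =====
-- one formatted entry: '{}: {:<20.20}'.format(n, item)
def pvEntryB (n : Int) (s : String) : List Char :=
  (PySem.Int.toStr n).toList ++ (": ".toList) ++ pvFmt20 s.toList

-- the lines: chunks of two modifiers, '|' between the two entries of a chunk
def pvLinesB : Int → List String → List (List Char)
  | _, [] => []
  | n, [a] => [pvEntryB n a]
  | n, a :: b :: rest => (pvEntryB n a ++ '|' :: pvEntryB (n + 1) b) :: pvLinesB (n + 2) rest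

def pretty_mods_alt (mods : List String) : String :=
  let body := List.intercalate ['\n'] (pvLinesB 1 mods)
  String.ofList ("```".toList ++ (if body = [] then "[no modifiers found]".toList else body) ++ "```".toList)

-- ===== PRECONDITION & SPEC =====
def Spec_pretty_mods (mods : List String) (out : String) : Prop := out = pretty_mods_alt mods
instance (mods : List String) (out : String) : Decidable (Spec_pretty_mods mods out) := by unfold Spec_pretty_mods; infer_instance

-- ===== CLAIM (what is proved, stated in full; the proofs are below) =====
def Claim_equal_pretty_mods : Prop := ∀ (mods : List String), Dom_pretty_mods mods → Spec_pretty_mods mods (pretty_mods mods)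

-- ===== LEMMAS AND PROOFS =====

-- A's fold from a 'line = True' state appends '\n' before every line of B's chunking
theorem pvFold_eq_lines (mods : List String) (n : Int) (acc : List Char) :
    (mods.foldl pvStepA (true, acc, n)).2.1
      = acc ++ ((pvLinesB n mods).map (fun l => '\n' :: l)).flatten := by
  induction n, mods using pvLinesB.induct generalizing acc with
  | case1 n => simp [pvLinesB]
  | case2 n a => simp [pvStepA, pvLinesB, pvEntryB]
  | case3 n a b rest ih =>
      simp only [List.foldl_cons, pvStepA, Bool.not_true, Bool.not_false, if_true,
        pvLinesB, pvEntryB, List.map_cons, List.flatten_cons]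
      rw [show n + 1 + 1 = n + 2 by ring, ih]
      simp

theorem pvEntryB_ne_nil (n : Int) (s : String) : pvEntryB n s ≠ [] := by
  have h : (pvFmt20 s.toList).length = 20 := by
    simp [pvFmt20]
  intro hc
  simp only [pvEntryB, List.append_eq_nil_iff] at hc
  have := hc.2
  simp [this] at h

theorem pvIntercalate_newline (l : List Char) (ls : List (List Char)) :
    List.intercalate ['\n'] (l :: ls) = l ++ (ls.map (fun x => '\n' :: x)).flatten := by
  induction ls generalizing l with
  | nil => simp [List.intercalate]
  | cons x xs ih =>
      have hstep : List.intercalate ['\n'] (l :: x :: xs)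
          = l ++ ['\n'] ++ List.intercalate ['\n'] (x :: xs) := by
        simp [List.intercalate, List.intersperse]
      rw [hstep, ih x]
      simp

-- ===== VERDICT (by name: the statement is the Claim_ definition above) =====
theorem pretty_mods_spec : Claim_equal_pretty_mods := by
  intro mods _
  unfold Spec_pretty_mods pretty_mods pretty_mods_alt
  dsimp only
  cases mods with
  | nil => simp [pvLinesB, List.intercalate]
  | cons a rest =>
      have hfold := pvFold_eq_lines (a :: rest) 1 []
      rw [hfold]
      have hlines : ∃ l ls, pvLinesB 1 (a :: rest) = l :: ls ∧ l ≠ [] := by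
        cases rest with
        | nil => exact ⟨_, _, rfl, pvEntryB_ne_nil _ _⟩
        | cons b r =>
            refine ⟨_, _, rfl, ?_⟩
            intro hc
            exact pvEntryB_ne_nil 1 a (List.append_eq_nil_iff.mp hc).1
      obtain ⟨l, ls, hl, hne⟩ := hlines
      rw [hl, pvIntercalate_newline l ls]
      have h1 : l ++ (ls.map (fun x => '\n' :: x)).flatten ≠ [] := by
        intro hc; exact hne (List.append_eq_nil_iff.mp hc).1
      simp [h1]
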